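-- pv_equiv track=rewrite | github.com/bdc0/findbestpictures | ls_parser.py | group_files_by_time
-- ===== SOURCE A (Python) =====
-- def group_files_by_time(files, delta_seconds=30):
--     """
--     Groups files where each file is created less than 'delta_seconds'
--     from the previous one.
--     """
--     if not files:
--         return []
--
--     # Sort by timestamp
--     files.sort(key=lambda x: x['timestamp'])
--
--     groups = []
--     current_group = [files[0]]
--
--     for i in range(1, len(files)):
--         prev_file = files[i-1]
--         curr_file = files[i]
--
--         time_diff = curr_file['timestamp'] - prev_file['timestamp']
--
--         if time_diff < delta_seconds:
--             current_group.append(curr_file)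
--         else:
--             groups.append(current_group)
--             current_group = [curr_file]
--
--     if current_group:
--         groups.append(current_group)
--
--     return groups
-- ===== SOURCE B (Python) =====
-- def group_files_by_time(files, delta_seconds=30):
--     """
--     Groups files where each file is created less than 'delta_seconds'
--     from the previous one.
--     """
--     if not files:
--         return []
--
--     # Sort by timestamp (in place, like A)
--     files.sort(key=lambda x: x['timestamp'])
--
--     n = len(files)
--     # Pass 1: boundary indices where a new group starts
--     bounds = [i for i in range(1, n)
--               if files[i]['timestamp'] - files[i - 1]['timestamp'] >= delta_seconds]
--     # Pass 2: slice the sorted list between consecutive edges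
--     edges = [0] + bounds + [n]
--     return [files[a:b] for a, b in zip(edges, edges[1:])]
-- ===== Notes on version B (the rewrite author's own statement) =====
-- stated objective: alternative
-- what changed: Replaces A's single accumulator loop (growing a current group and flushing it at gaps) by a two-pass decomposition: first collect the boundary indices where the gap is >= delta_seconds, then build the groups by slicing the sorted list between consecutive boundaries.
import Mathlib
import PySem

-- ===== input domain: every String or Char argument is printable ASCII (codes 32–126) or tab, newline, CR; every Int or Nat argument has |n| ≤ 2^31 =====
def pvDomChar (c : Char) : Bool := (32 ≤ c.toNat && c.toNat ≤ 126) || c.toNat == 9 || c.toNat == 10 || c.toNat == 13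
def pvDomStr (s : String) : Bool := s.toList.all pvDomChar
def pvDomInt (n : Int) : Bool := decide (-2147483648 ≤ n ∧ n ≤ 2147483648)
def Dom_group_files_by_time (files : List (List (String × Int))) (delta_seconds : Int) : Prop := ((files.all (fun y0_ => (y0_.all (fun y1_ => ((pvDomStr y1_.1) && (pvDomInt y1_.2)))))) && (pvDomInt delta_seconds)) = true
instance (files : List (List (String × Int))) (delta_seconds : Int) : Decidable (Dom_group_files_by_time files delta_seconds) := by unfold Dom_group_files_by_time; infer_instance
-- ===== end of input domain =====

-- B replaces A's accumulator loop by a boundary-index pass plus a slicing pass (alternative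
-- decomposition, same cost). Both Pythons sort `files` in place; the equivalence proved here is
-- about the RETURN value (B performs the same in-place sort as A).

-- ===== PORT A =====
-- x['timestamp'] as a total lookup with default 0: exact under Pre_ (every file has the key).
def pvTs (f : List (String × Int)) : Int := PySem.Dict.getD (PySem.Dict.mk f) "timestamp" 0

def group_files_by_time (files : List (List (String × Int))) (delta_seconds : Int) : List (List (List (String × Int))) :=
  if files.isEmpty then []
  else
    let fs := PySem.List.sorted files pvTs false
    let s := (PySem.List.pyRange 1 (fs.length : Int) 1).foldl
      (fun (s : List (List (List (String × Int))) × List (List (String × Int))) i =>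
        let prev_file := PySem.List.pyGetD fs (i - 1) []
        let curr_file := PySem.List.pyGetD fs i []
        if pvTs curr_file - pvTs prev_file < delta_seconds then (s.1, s.2 ++ [curr_file])
        else (s.1 ++ [s.2], [curr_file]))
      ([], [PySem.List.pyGetD fs 0 []])
    if s.2.isEmpty then s.1 else s.1 ++ [s.2]

-- ===== PORT B =====
def group_files_by_time_alt (files : List (List (String × Int))) (delta_seconds : Int) : List (List (List (String × Int))) :=
  if files.isEmpty then []
  else
    let fs := PySem.List.sorted files pvTs false
    let n : Int := fs.length
    let bounds := (PySem.List.pyRange 1 n 1).filter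
      (fun i => decide (delta_seconds ≤ pvTs (PySem.List.pyGetD fs i []) - pvTs (PySem.List.pyGetD fs (i - 1) [])))
    let edges := 0 :: (bounds ++ [n])
    (edges.zip edges.tail).map (fun ab => PySem.List.slice fs (some ab.1) (some ab.2))

-- ===== PRECONDITION & SPEC =====
-- Pre_ excludes exactly the inputs where some file lacks the 'timestamp' key, on which A raises KeyError.
def Pre_group_files_by_time (files : List (List (String × Int))) (delta_seconds : Int) : Prop :=
  ∀ f ∈ files, (PySem.Dict.get? (PySem.Dict.mk f) "timestamp").isSome = true
instance (files : List (List (String × Int))) (delta_seconds : Int) : Decidable (Pre_group_files_by_time files delta_seconds) := by unfold Pre_group_files_by_time; infer_instance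

def pvWitness_group_files_by_time : (List (List (String × Int))) × Int :=
  ([[("timestamp", 40)], [("timestamp", 1)], [("timestamp", 5)]], 30)

def Spec_group_files_by_time (files : List (List (String × Int))) (delta_seconds : Int) (out : List (List (List (String × Int)))) : Prop := out = group_files_by_time_alt files delta_seconds
instance (files : List (List (String × Int))) (delta_seconds : Int) (out : List (List (List (String × Int)))) : Decidable (Spec_group_files_by_time files delta_seconds out) := by unfold Spec_group_files_by_time; infer_instance

-- ===== CLAIM (what is proved, stated in full; the proofs are below) =====
def Claim_equal_group_files_by_time : Prop := ∀ (files : List (List (String × Int))) (delta_seconds : Int), Dom_group_files_by_time files delta_seconds → Pre_group_files_by_time files delta_seconds → Spec_group_files_by_time files delta_seconds (group_files_by_time files delta_seconds)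

-- ===== LEMMAS AND PROOFS =====

-- Canonical recursive grouping: walk the sorted list carrying the previous element and the
-- current group; both ports are proved equal to this.
def pvChunks (ds : Int) : List (String × Int) → List (List (String × Int)) → List (List (String × Int)) → List (List (List (String × Int)))
  | _, cur, [] => [cur]
  | prev, cur, x :: xs =>
      if pvTs x - pvTs prev < ds then pvChunks ds x (cur ++ [x]) xs
      else cur :: pvChunks ds x [x] xs

-- A-side: the pair fold with (groups, current) state, then the final flush, is pvChunks.
theorem pvZipFold (ds : Int) (rest : List (List (String × Int))) :
    ∀ (prev : List (String × Int)) (groups : List (List (List (String × Int)))) (cur : List (List (String × Int))), cur ≠ [] →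
    (let s := ((prev :: rest).zip rest).foldl
        (fun (s : List (List (List (String × Int))) × List (List (String × Int))) p =>
          if pvTs p.2 - pvTs p.1 < ds then (s.1, s.2 ++ [p.2]) else (s.1 ++ [s.2], [p.2]))
        (groups, cur);
      if s.2.isEmpty then s.1 else s.1 ++ [s.2]) = groups ++ pvChunks ds prev cur rest := by
  induction rest with
  | nil =>
      intro prev groups cur hcur
      simp [pvChunks, List.isEmpty_iff, hcur]
  | cons x xs ih =>
      intro prev groups cur hcur
      simp only [List.zip_cons_cons, List.foldl_cons]
      by_cases h : pvTs x - pvTs prev < ds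
      · simpa [pvChunks, h] using ih x groups (cur ++ [x]) (by simp)
      · simpa [pvChunks, h] using ih x (groups ++ [cur]) [x] (by simp)

-- the index fold over pyRange (a+1, len+1) reading zs[i-1] is the fold over the dropped suffix.
theorem pvFoldShift {α S : Type} (zs : List α) (d : α) (h : S → α → S) :
    ∀ (n a : Nat) (init : S), n = zs.length - a →
    (PySem.List.pyRange ((a : Int) + 1) ((zs.length : Int) + 1) 1).foldl
      (fun s i => h s (PySem.List.pyGetD zs (i - 1) d)) init = (zs.drop a).foldl h init := by
  intro n
  induction n with
  | zero =>
      intro a init hn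
      rw [PySem.List.pyRange_one_eq_nil (by omega), List.drop_eq_nil_of_le (by omega)]
      rfl
  | succ n ihn =>
      intro a init hn
      have ha : a < zs.length := by omega
      rw [PySem.List.pyRange_one_cons (by omega)]
      simp only [List.foldl_cons]
      have e1 : PySem.List.pyGetD zs ((a : Int) + 1 - 1) d = zs[a] := by
        have h2 : ((a : Int) + 1 - 1) = (a : Int) := by ring
        rw [h2, PySem.List.pyGetD_natCast, List.getD_eq_getElem _ _ ha]
      rw [e1, List.drop_eq_getElem_cons ha]
      simp only [List.foldl_cons]
      have hrec := ihn (a + 1) (h init zs[a]) (by omega)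
      push_cast at hrec ⊢
      exact hrec

-- A-side: the index fold over pyRange 1 n accessing fs[i-1], fs[i] is the fold over adjacent pairs.
theorem pvIdxFold {S : Type} (f0 : List (String × Int)) (rest : List (List (String × Int)))
    (step : List (String × Int) → List (String × Int) → S → S) (init : S) :
    (PySem.List.pyRange 1 ((f0 :: rest).length : Int) 1).foldl
      (fun s i => step (PySem.List.pyGetD (f0 :: rest) (i - 1) []) (PySem.List.pyGetD (f0 :: rest) i []) s) init
    = ((f0 :: rest).zip rest).foldl (fun s p => step p.1 p.2 s) init := by
  set fs := f0 :: rest with hfs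
  have hlen : (fs.length : Int) = (rest.length : Int) + 1 := by simp [hfs]
  have hzlen : (fs.zip rest).length = rest.length := by
    simp [hfs]
  -- replace indexing by getD on the zip list
  have hcongr : ∀ (s : S) (i : Int), i ∈ PySem.List.pyRange 1 (fs.length : Int) 1 →
      step (PySem.List.pyGetD fs (i - 1) []) (PySem.List.pyGetD fs i []) s
      = (fun (s : S) (p : List (String × Int) × List (String × Int)) => step p.1 p.2 s) s
          (PySem.List.pyGetD (fs.zip rest) (i - 1) ([], [])) := by
    intro s i hi
    rw [PySem.List.mem_pyRange_one] at hi
    obtain ⟨h1, h2⟩ := hi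
    obtain ⟨k, hk⟩ : ∃ k : Nat, i = (k : Int) + 1 := ⟨(i - 1).toNat, by omega⟩
    subst hk
    have hk2 : k + 1 < fs.length := by exact_mod_cast (by omega : ((k:Int) + 1) < (fs.length : Int))
    have hk1 : k < (fs.zip rest).length := by omega
    have e1 : PySem.List.pyGetD fs ((k : Int) + 1 - 1) [] = fs[k] := by
      have : ((k : Int) + 1 - 1) = (k : Int) := by ring
      rw [this, PySem.List.pyGetD_natCast, List.getD_eq_getElem]
    have e2 : PySem.List.pyGetD fs ((k : Int) + 1) [] = fs[k + 1] := by
      have : ((k : Int) + 1) = ((k + 1 : Nat) : Int) := by push_cast; ring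
      rw [this, PySem.List.pyGetD_natCast, List.getD_eq_getElem]
    have e3 : PySem.List.pyGetD (fs.zip rest) ((k : Int) + 1 - 1) ([], []) = (fs.zip rest)[k] := by
      have : ((k : Int) + 1 - 1) = (k : Int) := by ring
      rw [this, PySem.List.pyGetD_natCast, List.getD_eq_getElem]
    rw [e1, e2, e3]
    have hz : (fs.zip rest)[k] = (fs[k], rest[k]) := List.getElem_zip ..
    have hr : rest[k]'(by omega) = fs[k + 1] := by
      simp [hfs]
    rw [hz]
    simp [hr]
  refine Eq.trans (PySem.List.foldl_congr_mem _ _ _ _ hcongr) ?_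
  -- shift the range by one and fold over the zip list
  have hzl : (((fs.zip rest).length : Int)) + 1 = (fs.length : Int) := by omega
  have hfin := pvFoldShift (fs.zip rest) ([], []) (fun s p => step p.1 p.2 s)
    (fs.zip rest).length 0 init (by omega)
  simp only [Nat.cast_zero, zero_add, List.drop_zero] at hfin
  rw [hzl] at hfin
  exact hfin

-- B-side: slices between consecutive edges.
def pvSB (fs : List (List (String × Int))) : Int → List Int → List (List (List (String × Int)))
  | _, [] => []
  | a, b :: rest => PySem.List.slice fs (some a) (some b) :: pvSB fs b rest

theorem pvZipMap (fs : List (List (String × Int))) (es : List Int) :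
    ∀ (e : Int), (((e :: es).zip es).map (fun ab => PySem.List.slice fs (some ab.1) (some ab.2))) = pvSB fs e es := by
  induction es with
  | nil => intro e; simp [pvSB]
  | cons b rest ih => intro e; simp [pvSB, ih b]

theorem pvSliceSucc (fs : List (List (String × Int))) (c j : Nat) (hcj : c ≤ j) (hj : j < fs.length) :
    PySem.List.slice fs (some (c : Int)) (some ((j : Int) + 1))
      = PySem.List.slice fs (some (c : Int)) (some (j : Int)) ++ [fs[j]] := by
  have h1 : ((j : Int) + 1) = (((j + 1 : Nat)) : Int) := by push_cast; ring
  rw [h1, PySem.List.slice_natCast, PySem.List.slice_natCast]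
  have h2 : j + 1 - c = (j - c) + 1 := by omega
  rw [h2, List.take_add_one]
  have h3 : (fs.drop c)[j - c]? = some fs[j] := by
    rw [List.getElem?_drop]
    have : c + (j - c) = j := by omega
    rw [this, List.getElem?_eq_getElem hj]
  simp [h3]

-- B-side main lemma: slicing at the filtered boundary indices is pvChunks on the suffix.
theorem pvBmain (ds : Int) (fs : List (List (String × Int))) (rest : List (List (String × Int))) :
    ∀ (j c : Nat), 0 < j → c < j → j + rest.length = fs.length → rest = fs.drop j →
    pvSB fs (c : Int)
      (((PySem.List.pyRange (j : Int) (fs.length : Int) 1).filter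
          (fun i => decide (ds ≤ pvTs (PySem.List.pyGetD fs i []) - pvTs (PySem.List.pyGetD fs (i - 1) [])))) ++ [(fs.length : Int)])
    = pvChunks ds (fs.getD (j - 1) []) (PySem.List.slice fs (some (c : Int)) (some (j : Int))) rest := by
  induction rest with
  | nil =>
      intro j c hj hcj hlen hdrop
      have hjn : (j : Int) = (fs.length : Int) := by simp at hlen; omega
      rw [hjn, PySem.List.pyRange_one_eq_nil (le_refl _)]
      simp [pvSB, pvChunks]
  | cons x xs ih =>
      intro j c hj hcj hlen hdrop
      have hjlt : j < fs.length := by simp at hlen; omega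
      have hx : fs[j] = x := by
        have h0 := congrArg (fun l => l[0]?) hdrop
        simp [List.getElem?_drop, List.getElem?_eq_getElem hjlt] at h0
        exact h0.symm
      have hxs : xs = fs.drop (j + 1) := by
        have h1 := congrArg List.tail hdrop
        simpa [List.tail_drop] using h1
      have hjn : (j : Int) < (fs.length : Int) := by exact_mod_cast hjlt
      rw [PySem.List.pyRange_one_cons hjn, List.filter_cons]
      have ej : PySem.List.pyGetD fs (j : Int) [] = x := by
        rw [PySem.List.pyGetD_natCast, List.getD_eq_getElem _ _ hjlt, hx]
      have ejm : PySem.List.pyGetD fs ((j : Int) - 1) [] = fs.getD (j - 1) [] := by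
        have h2 : ((j : Int) - 1) = (((j - 1 : Nat)) : Int) := by omega
        rw [h2, PySem.List.pyGetD_natCast]
      have hgd : fs.getD (j + 1 - 1) [] = x := by
        show fs.getD j [] = x
        rw [List.getD_eq_getElem _ _ hjlt, hx]
      by_cases h : ds ≤ pvTs x - pvTs (fs.getD (j - 1) [])
      · -- boundary: a new group starts at j
        have hfilter : decide (ds ≤ pvTs (PySem.List.pyGetD fs (j:Int) []) - pvTs (PySem.List.pyGetD fs ((j:Int) - 1) [])) = true := by
          rw [ej, ejm]; exact decide_eq_true h
        rw [if_pos hfilter]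
        have ihj := ih (j + 1) j (by omega) (by omega) (by simp at hlen ⊢; omega) hxs
        have hsl : PySem.List.slice fs (some ((j : Nat) : Int)) (some (((j + 1 : Nat)) : Int)) = [x] := by
          rw [PySem.List.slice_natCast]
          have h2 : j + 1 - j = 1 := by omega
          rw [h2, ← hdrop]; simp
        rw [hgd, hsl] at ihj
        push_cast at ihj ⊢
        simp only [List.cons_append, pvSB]
        rw [ihj]
        simp only [pvChunks]
        rw [if_neg (not_lt.mpr h)]
      · -- no boundary: x joins the current group
        have hfilter : decide (ds ≤ pvTs (PySem.List.pyGetD fs (j:Int) []) - pvTs (PySem.List.pyGetD fs ((j:Int) - 1) [])) = false := by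
          rw [ej, ejm]; exact decide_eq_false h
        rw [if_neg (by rw [hfilter]; simp)]
        have ihj := ih (j + 1) c (by omega) (by omega) (by simp at hlen ⊢; omega) hxs
        rw [hgd] at ihj
        have hsl := pvSliceSucc fs c j (by omega) hjlt
        rw [hx] at hsl
        push_cast at ihj hsl ⊢
        rw [ihj, hsl]
        simp only [pvChunks]
        rw [if_pos (not_le.mp h)]

-- ===== VERDICT (by name: the statement is the Claim_ definition above) =====
theorem group_files_by_time_spec : Claim_equal_group_files_by_time := by
  intro files ds _ _
  unfold Spec_group_files_by_time
  by_cases hemp : files.isEmpty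
  · unfold group_files_by_time group_files_by_time_alt
    simp [hemp]
  · have hne : PySem.List.sorted files pvTs false ≠ [] := by
      rw [Ne, PySem.List.sorted_eq_nil_iff]
      intro h; rw [h] at hemp; simp at hemp
    obtain ⟨f0, rest, hfs⟩ := List.exists_cons_of_ne_nil hne
    -- A side: the port equals pvChunks ds f0 [f0] rest
    have hA2 : group_files_by_time files ds = pvChunks ds f0 [f0] rest := by
      have hA := pvIdxFold f0 rest
        (fun prev curr (s : List (List (List (String × Int))) × List (List (String × Int))) =>
          if pvTs curr - pvTs prev < ds then (s.1, s.2 ++ [curr]) else (s.1 ++ [s.2], [curr]))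
        (([] : List (List (List (String × Int)))), [f0])
      have hZF := pvZipFold ds rest f0 [] [f0] (by simp)
      unfold group_files_by_time
      rw [if_neg hemp]
      simp only [hfs, PySem.List.pyGetD_zero_cons]
      rw [hA]
      simpa using hZF
    -- B side: the port equals pvChunks ds f0 [f0] rest
    have hB2 : group_files_by_time_alt files ds = pvChunks ds f0 [f0] rest := by
      unfold group_files_by_time_alt
      rw [if_neg hemp]
      simp only [hfs, List.tail_cons]
      rw [pvZipMap]
      have hBM := pvBmain ds (f0 :: rest) rest 1 0 (by omega) (by omega) (by simp [Nat.add_comm]) (by simp)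
      have hsl1 : PySem.List.slice (f0 :: rest) (some ((0 : Nat) : Int)) (some ((1 : Nat) : Int)) = [f0] := by
        rw [PySem.List.slice_natCast]; simp
      rw [hsl1] at hBM
      simpa using hBM
    rw [hA2, hB2]
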